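-- pv_equiv track=rewrite | github.com/lucia-ferrer/evolutivos | INVERSE_PERMUTATION/file.py | encode_I
-- ===== SOURCE A (Python) =====
-- def encode_I(perm):
--     """
--     input: permutation i0...iN
--     output: inverse permutation a0 ... aN
--     For a permutation i1, i2, . . . , iN of the set {1, 2, . . . , N } we let aj denote the number of integers in the permutation which precede j but are greater than j.
--     So, aj is a measure of how much out of order j is.
--     The sequence of numbers a1, a2, . . . , aN is called the inversion sequence of the permutation i1, i2, . . . , iN .
--     The inversion sequence a1, a2, . . . , aN satisfies the conditions 0 ≤ ai ≤ N − i for i = 1, 2, . . . , N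
--     As seen there is no restriction on the elements which says ai = aj is forbidden for i different of j.
--     This is, of course, very convenient for the crossover and mutation operations in GA.
--     """
--     N = len(perm)
--     inv = [0] * N  # Initialize the inversion sequence with zeros
--
--     for i in range(N):
--         inv_i = 0
--         m = 1
--         while m <= N and perm[m - 1] != (i + 1):
--             if perm[m - 1] > (i + 1):
--                 inv_i += 1
--             m += 1
--         inv[i] = inv_i
--
--     return inv
-- ===== SOURCE B (Python) =====
-- def encode_I(perm):
--     # Transposed single scan: walk the permutation once; each still-unresolved
--     # target j gains 1 for every passing element greater than j, and j is
--     # resolved when its first occurrence is reached.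
--     N = len(perm)
--     inv = [0] * N
--     pending = set(range(1, N + 1))
--     for x in perm:
--         for j in pending:
--             if j < x:
--                 inv[j - 1] += 1
--         pending.discard(x)
--     return inv
-- ===== Notes on version B (the rewrite author's own statement) =====
-- stated objective: alternative
-- what changed: A runs one linear search per target j (restarting from the front each time, counting greater elements until j is found); B scans the permutation exactly once, keeping a pending set of not-yet-seen targets and crediting every passing element to all pending targets smaller than it.
import Mathlib
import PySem

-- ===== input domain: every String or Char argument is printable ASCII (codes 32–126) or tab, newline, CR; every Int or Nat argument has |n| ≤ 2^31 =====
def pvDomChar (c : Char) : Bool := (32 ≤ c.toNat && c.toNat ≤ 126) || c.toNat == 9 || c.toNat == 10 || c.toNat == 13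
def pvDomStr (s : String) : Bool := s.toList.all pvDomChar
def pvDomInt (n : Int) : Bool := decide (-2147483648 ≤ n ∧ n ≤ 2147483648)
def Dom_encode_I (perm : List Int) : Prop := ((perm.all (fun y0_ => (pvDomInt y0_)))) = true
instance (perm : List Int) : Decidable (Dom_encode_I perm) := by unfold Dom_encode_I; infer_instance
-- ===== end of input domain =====

-- B replaces A's per-target linear search with a single transposed scan of the
-- permutation that updates all still-unresolved targets at once (objective: alternative).

-- ===== PORT A =====
-- inner while loop of A: 'while m <= N and perm[m-1] != tgt: if perm[m-1] > tgt: acc += 1; m += 1'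
-- (perm[m-1] is only read under the guard m ≤ N, where the index is in range, so pyGetD is exact)
def encode_I_inner (perm : List Int) (N : ℕ) (tgt : Int) (m : ℕ) (acc : Int) : Int :=
  if m ≤ N then
    if PySem.List.pyGetD perm ((m : Int) - 1) 0 ≠ tgt then
      encode_I_inner perm N tgt (m + 1)
        (if PySem.List.pyGetD perm ((m : Int) - 1) 0 > tgt then acc + 1 else acc)
    else acc
  else acc
termination_by N + 1 - m
decreasing_by omega

def encode_I (perm : List Int) : List Int :=
  let N := perm.length
  let inv : List Int := List.replicate N 0
  (List.range N).foldl
    (fun (inv : List Int) (i : ℕ) =>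
      PySem.List.pySetD inv (i : Int) (encode_I_inner perm N ((i : Int) + 1) 1 0)) inv

-- ===== PORT B =====
def encode_I_alt (perm : List Int) : List Int :=
  let N := perm.length
  let inv : List Int := List.replicate N 0
  let pending : PySem.Set Int := PySem.Set.ofList (PySem.List.pyRange 1 ((N : Int) + 1))
  (perm.foldl
    (fun (st : List Int × PySem.Set Int) x =>
      (st.2.foldl
        (fun inv j =>
          if j < x then
            PySem.List.pySetD inv (j - 1) (PySem.List.pyGetD inv (j - 1) 0 + 1)
          else inv) st.1,
       PySem.Set.discard st.2 x)) (inv, pending)).1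

-- ===== PRECONDITION & SPEC =====
def Spec_encode_I (perm : List Int) (out : List Int) : Prop := out = encode_I_alt perm
instance (perm : List Int) (out : List Int) : Decidable (Spec_encode_I perm out) := by unfold Spec_encode_I; infer_instance

-- ===== CLAIM (what is proved, stated in full; the proofs are below) =====
def Claim_equal_encode_I : Prop := ∀ (perm : List Int), Dom_encode_I perm → Spec_encode_I perm (encode_I perm)

-- ===== LEMMAS AND PROOFS =====

-- the common value: number of elements greater than t strictly before the first occurrence of t
def pvCount (pre : List Int) (t : Int) : Int :=
  (((pre.takeWhile (fun v => v ≠ t)).filter (fun v => t < v)).length : Int)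

-- the common target: both programs compute this list
def pvSpec (perm : List Int) : List Int :=
  (List.range perm.length).map (fun (i : ℕ) => pvCount perm ((i : Int) + 1))

-- A's inner while loop counts over the remaining suffix
lemma encode_I_inner_eq (suf : List Int) : ∀ (pre : List Int) (tgt acc : Int),
    encode_I_inner (pre ++ suf) (pre ++ suf).length tgt (pre.length + 1) acc
      = acc + pvCount suf tgt := by
  induction suf with
  | nil =>
    intro pre tgt acc
    rw [encode_I_inner, if_neg (by simp)]
    simp [pvCount]
  | cons v rest ih =>
    intro pre tgt acc
    have hle : pre.length + 1 ≤ (pre ++ v :: rest).length := by simp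
    have hget : PySem.List.pyGetD (pre ++ v :: rest) ((pre.length + 1 : ℕ) - 1 : Int) 0 = v := by
      have : ((pre.length + 1 : ℕ) : Int) - 1 = ((pre.length : ℕ) : Int) := by push_cast; ring
      rw [this, PySem.List.pyGetD_natCast]
      simp [List.getD_eq_getElem?_getD]
    rw [encode_I_inner, if_pos hle, hget]
    by_cases hv : v = tgt
    · rw [if_neg (by simp [hv])]
      simp [pvCount, hv]
    · rw [if_pos hv]
      have h2 := ih (pre ++ [v]) tgt (if v > tgt then acc + 1 else acc)
      simp only [List.append_assoc, List.cons_append, List.nil_append] at h2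
      have hlen : (pre ++ [v]).length + 1 = pre.length + 1 + 1 := by simp
      rw [hlen] at h2
      rw [h2]
      by_cases hgt : tgt < v <;> simp [pvCount, hv, hgt]; push_cast; ring

-- writing f i at every index i of range N over a replicate produces the map
lemma foldl_set_outside (is : List ℕ) (f : ℕ → Int) : ∀ (l1 l2 : List Int),
    (∀ i ∈ is, i < l1.length) →
    is.foldl (fun l i => l.set i (f i)) (l1 ++ l2)
      = is.foldl (fun l i => l.set i (f i)) l1 ++ l2 := by
  induction is with
  | nil => intro l1 l2 h; rfl
  | cons j js ih =>
    intro l1 l2 h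
    simp only [List.foldl_cons]
    rw [List.set_append, if_pos (h j (by simp))]
    exact ih (l1.set j (f j)) l2 (by intro i hi; simpa using h i (by simp [hi]))

lemma foldl_set_range (f : ℕ → Int) : ∀ (N : ℕ),
    (List.range N).foldl (fun l i => l.set i (f i)) (List.replicate N 0)
      = (List.range N).map f := by
  intro N
  induction N with
  | zero => rfl
  | succ n ih =>
    rw [List.range_succ, List.foldl_append]
    have hrep : List.replicate (n+1) (0:Int) = List.replicate n 0 ++ [0] := by
      simp [List.replicate_succ']
    rw [hrep, foldl_set_outside _ _ _ _ (by intro i hi; simpa using List.mem_range.mp hi), ih]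
    simp only [List.foldl_cons, List.foldl_nil]
    rw [List.set_append, if_neg (by simp)]
    simp

lemma encode_I_eq_spec (perm : List Int) : encode_I perm = pvSpec perm := by
  simp only [encode_I, pvSpec]
  have hfun : (fun (inv : List Int) (i : ℕ) =>
      PySem.List.pySetD inv (i : Int) (encode_I_inner perm perm.length ((i : Int) + 1) 1 0))
      = (fun inv i => inv.set i (pvCount perm ((i : Int) + 1))) := by
    funext inv i
    rw [PySem.List.pySetD_natCast]
    congr 1
    have h := encode_I_inner_eq perm [] ((i : Int) + 1) 0
    simpa using h
  rw [hfun, foldl_set_range]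

-- setting one cell of a mapped range rewrites the mapped function at that index
lemma set_map_range (N k : ℕ) (g : ℕ → Int) (v : Int) :
    ((List.range N).map g).set k v
      = (List.range N).map (fun i => if i = k then v else g i) := by
  apply List.ext_getElem (by simp)
  intro n h1 h2
  simp only [List.getElem_set, List.getElem_map, List.getElem_range]
  split_ifs with h3 h4 h5
  · rfl
  · exact absurd h3.symm h4
  · exact absurd h5.symm h3
  · rfl

-- B's inner loop: each pending target j < x gains one at cell j-1
lemma bump_foldl (x : Int) : ∀ (js : List Int) (g : ℕ → Int) (N : ℕ),
    js.Nodup → (∀ j ∈ js, 1 ≤ j ∧ j ≤ (N : Int)) →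
    js.foldl
      (fun inv j =>
        if j < x then
          PySem.List.pySetD inv (j - 1) (PySem.List.pyGetD inv (j - 1) 0 + 1)
        else inv) ((List.range N).map g)
      = (List.range N).map
          (fun i => g i + if ((i : Int) + 1 ∈ js ∧ (i : Int) + 1 < x) then 1 else 0) := by
  intro js
  induction js with
  | nil => intro g N _ _; simp
  | cons j js ih =>
    intro g N hnd hb
    have hj := hb j (by simp)
    have hnd' := (List.nodup_cons.mp hnd)
    simp only [List.foldl_cons]
    by_cases hx : j < x
    · rw [if_pos hx, PySem.List.pySetD_of_nonneg _ _ (by omega),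
        PySem.List.pyGetD_of_nonneg _ _ (by omega)]
      have hkN' : j.toNat - 1 < N := by omega
      have hget : ((List.range N).map g).getD (j-1).toNat 0 = g (j-1).toNat := by
        rw [List.getD_eq_getElem?_getD]
        simp [hkN']
      rw [hget, set_map_range, ih _ N hnd'.2 (fun a ha => hb a (by simp [ha]))]
      apply List.map_congr_left
      intro i hi
      by_cases he : (i : Int) + 1 = j
      · have hik : i = (j-1).toNat := by omega
        rw [if_pos hik]
        have hgi : g (j.toNat - 1) = g i := by congr 1; omega
        simp [he, hnd'.1, hx, hgi]
      · have hik : ¬ i = (j-1).toNat := by omega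
        rw [if_neg hik]
        simp [he]
    · rw [if_neg hx, ih _ N hnd'.2 (fun a ha => hb a (by simp [ha]))]
      apply List.map_congr_left
      intro i hi
      by_cases he : (i : Int) + 1 = j
      · simp [he, hx]
      · simp [he]

-- appending one element x to the scanned prefix changes pvCount exactly like one bump
lemma pvCount_append_single (pre : List Int) (x t : Int) :
    pvCount (pre ++ [x]) t = pvCount pre t + if (t ∉ pre ∧ t < x) then 1 else 0 := by
  unfold pvCount
  by_cases hm : t ∈ pre
  · have hlt : (pre.takeWhile (fun v => v ≠ t)).length ≠ pre.length := by
      intro hlen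
      have := (List.takeWhile_prefix (l := pre) (p := fun v => v ≠ t)).eq_of_length hlen
      have hall := List.takeWhile_eq_self_iff.mp this
      simpa using hall t hm
    rw [List.takeWhile_append, if_neg hlt]
    simp [hm]
  · have hall : pre.takeWhile (fun v => v ≠ t) = pre :=
      List.takeWhile_eq_self_iff.mpr (by intro a ha; simp; rintro rfl; exact hm ha)
    have hall2 : List.takeWhile (fun v => !decide (v = t)) pre = pre := by
      simpa using hall
    rw [List.takeWhile_append, if_pos (by rw [hall])]
    by_cases hx : x = t
    · simp [hx, hm]
      rw [hall2]
    · rw [List.takeWhile_cons]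
      simp only [List.takeWhile_nil]
      rw [if_pos (by simp [hx])]
      by_cases ht : t < x
      · simp [List.filter_append, ht, hm]
        rw [hall2]
      · simp [List.filter_append, ht, hm]
        rw [hall2]

-- the pending set after scanning pre
def pvPend (N : ℕ) (pre : List Int) : List Int :=
  (PySem.List.pyRange 1 ((N : Int) + 1)).filter (fun j => !pre.contains j)

lemma pvPend_discard (N : ℕ) (pre : List Int) (x : Int) :
    PySem.Set.discard (pvPend N pre) x = pvPend N (pre ++ [x]) := by
  unfold pvPend PySem.Set.discard
  rw [List.filter_filter]
  apply List.filter_congr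
  intro a _
  by_cases h1 : a = x <;> by_cases h2 : a ∈ pre <;> simp [h1, h2]

lemma encode_I_alt_main (N : ℕ) : ∀ (suf pre : List Int),
    (suf.foldl
      (fun (st : List Int × PySem.Set Int) x =>
        (st.2.foldl
          (fun inv j =>
            if j < x then
              PySem.List.pySetD inv (j - 1) (PySem.List.pyGetD inv (j - 1) 0 + 1)
            else inv) st.1,
         PySem.Set.discard st.2 x))
      ((List.range N).map (fun (i : ℕ) => pvCount pre ((i : Int) + 1)), pvPend N pre)).1
      = (List.range N).map (fun (i : ℕ) => pvCount (pre ++ suf) ((i : Int) + 1)) := by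
  intro suf
  induction suf with
  | nil => intro pre; simp
  | cons x rest ih =>
    intro pre
    simp only [List.foldl_cons]
    have hnd : (pvPend N pre).Nodup :=
      List.Nodup.filter _ (PySem.List.nodup_pyRange_one 1 ((N : Int) + 1))
    have hb : ∀ j ∈ pvPend N pre, 1 ≤ j ∧ j ≤ (N : Int) := by
      intro j hj
      have := List.mem_filter.mp hj
      have hr := (PySem.List.mem_pyRange_one).mp this.1
      omega
    rw [bump_foldl x (pvPend N pre) _ N hnd hb]
    have hmap : (List.range N).map
        (fun (i : ℕ) => pvCount pre ((i : Int) + 1)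
          + if ((i : Int) + 1 ∈ pvPend N pre ∧ (i : Int) + 1 < x) then 1 else 0)
        = (List.range N).map (fun (i : ℕ) => pvCount (pre ++ [x]) ((i : Int) + 1)) := by
      apply List.map_congr_left
      intro i hi
      have hiN : i < N := List.mem_range.mp hi
      rw [pvCount_append_single]
      congr 1
      have hmem : ((i : Int) + 1 ∈ pvPend N pre) ↔ ((i : Int) + 1 ∉ pre) := by
        unfold pvPend
        rw [List.mem_filter]
        simp [PySem.List.mem_pyRange_one]
        omega
      simp [hmem]
    rw [hmap, pvPend_discard, ih (pre ++ [x])]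
    simp


lemma encode_I_alt_eq_spec (perm : List Int) : encode_I_alt perm = pvSpec perm := by
  simp only [encode_I_alt, pvSpec]
  have h0 : List.replicate perm.length (0 : Int)
      = (List.range perm.length).map (fun (i : ℕ) => pvCount [] ((i : Int) + 1)) := by
    simp [pvCount]
  have hp : PySem.Set.ofList (PySem.List.pyRange 1 ((perm.length : Int) + 1))
      = pvPend perm.length [] := by
    rw [PySem.Set.ofList_eq_self_of_nodup _ (PySem.List.nodup_pyRange_one _ _)]
    unfold pvPend
    simp
  rw [h0, hp, encode_I_alt_main perm.length perm []]
  simp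


-- ===== VERDICT (by name: the statement is the Claim_ definition above) =====
theorem encode_I_spec : Claim_equal_encode_I := by
  intro perm _
  unfold Spec_encode_I
  rw [encode_I_eq_spec, encode_I_alt_eq_spec]
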